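-- pv_equiv track=rewrite | github.com/Crows12138/generative_agents_local_llm_with_godot | agents/cognitive_wrapper.py | get_nearby_tiles
-- ===== SOURCE A (Python) =====
-- from typing import List, Dict, Any, Optional
--
-- def get_nearby_tiles(curr_tile: tuple, vision_radius: int) -> List[tuple]:
--     """Get tiles within vision radius"""
--     x, y = curr_tile
--     nearby = []
--     for dx in range(-vision_radius, vision_radius + 1):
--         for dy in range(-vision_radius, vision_radius + 1):
--             if dx*dx + dy*dy <= vision_radius*vision_radius:
--                 nearby.append((x + dx, y + dy))
--     return nearby
-- ===== SOURCE B (Python) =====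
-- def _isqrt(n):
--     """Integer square root by Newton's method (for n <= 1 returns n)."""
--     if n <= 1:
--         return n
--     guess = 1 << ((n.bit_length() - 1) // 2 + 1)
--     while True:
--         nxt = (guess + n // guess) // 2
--         if nxt < guess:
--             guess = nxt
--         else:
--             return guess
--
-- def get_nearby_tiles(curr_tile, vision_radius):
--     """Get tiles within vision radius"""
--     x, y = curr_tile
--     nearby = []
--     for dx in range(-vision_radius, vision_radius + 1):
--         b = _isqrt(vision_radius * vision_radius - dx * dx)
--         for dy in range(-b, b + 1):
--             nearby.append((x + dx, y + dy))
--     return nearby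
-- ===== Notes on version B (the rewrite author's own statement) =====
-- stated objective: alternative
-- what changed: Instead of scanning the full (2r+1)x(2r+1) square and testing dx*dx+dy*dy<=r*r for every cell, B computes for each row dx the half-width b = isqrt(r*r-dx*dx) (integer Newton's method, no float) and emits the contiguous span dy in [-b,b] directly, with no per-cell distance test.
import Mathlib
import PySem

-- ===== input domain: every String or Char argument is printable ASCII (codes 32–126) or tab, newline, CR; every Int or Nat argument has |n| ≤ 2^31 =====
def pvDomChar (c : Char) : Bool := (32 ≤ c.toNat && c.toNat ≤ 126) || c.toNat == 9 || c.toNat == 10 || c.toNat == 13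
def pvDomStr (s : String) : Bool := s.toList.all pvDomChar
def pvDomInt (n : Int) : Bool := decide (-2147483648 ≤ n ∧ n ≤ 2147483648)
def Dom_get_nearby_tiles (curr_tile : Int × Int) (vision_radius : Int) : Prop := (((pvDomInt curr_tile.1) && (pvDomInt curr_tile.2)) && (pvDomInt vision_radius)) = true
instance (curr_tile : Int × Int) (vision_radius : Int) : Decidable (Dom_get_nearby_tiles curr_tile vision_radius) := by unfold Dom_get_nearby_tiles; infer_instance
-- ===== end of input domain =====

-- B replaces A's full-square scan with a per-row contiguous span [-isqrt(r²-dx²), isqrt(r²-dx²)],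
-- removing the per-cell distance test (a different traversal of the disc; same asymptotic cost).

-- ===== PORT A =====
def get_nearby_tiles (curr_tile : Int × Int) (vision_radius : Int) : List (Int × Int) :=
  let x := curr_tile.1
  let y := curr_tile.2
  (PySem.List.pyRange (-vision_radius) (vision_radius + 1) 1).foldl
    (fun nearby dx =>
      (PySem.List.pyRange (-vision_radius) (vision_radius + 1) 1).foldl
        (fun nearby dy =>
          if dx * dx + dy * dy ≤ vision_radius * vision_radius then nearby ++ [(x + dx, y + dy)]
          else nearby)
        nearby)
    []

-- ===== PORT B =====
-- Source B's `while True` Newton loop (entered only with n ≥ 2, where every value is a nonneg int,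
-- so it is transcribed on Nat); exact: recurse while nxt < guess, else return guess.
def pvIsqrtIter (n guess : Nat) : Nat :=
  let nxt := (guess + n / guess) / 2
  if _h : nxt < guess then
    pvIsqrtIter n nxt
  else
    guess
termination_by guess

-- Source B's _isqrt: `if n <= 1: return n` else Newton from guess = 1 << ((n.bit_length()-1)//2 + 1)
def pvIsqrt (n : Int) : Int :=
  if n ≤ 1 then n
  else (pvIsqrtIter n.toNat (1 <<< ((PySem.Int.bitLength n - 1) / 2 + 1)) : Int)

def get_nearby_tiles_alt (curr_tile : Int × Int) (vision_radius : Int) : List (Int × Int) :=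
  let x := curr_tile.1
  let y := curr_tile.2
  (PySem.List.pyRange (-vision_radius) (vision_radius + 1) 1).foldl
    (fun nearby dx =>
      let b := pvIsqrt (vision_radius * vision_radius - dx * dx)
      (PySem.List.pyRange (-b) (b + 1) 1).foldl
        (fun nearby dy => nearby ++ [(x + dx, y + dy)])
        nearby)
    []

-- ===== PRECONDITION & SPEC =====
def Spec_get_nearby_tiles (curr_tile : Int × Int) (vision_radius : Int) (out : List (Int × Int)) : Prop := out = get_nearby_tiles_alt curr_tile vision_radius
instance (curr_tile : Int × Int) (vision_radius : Int) (out : List (Int × Int)) : Decidable (Spec_get_nearby_tiles curr_tile vision_radius out) := by unfold Spec_get_nearby_tiles; infer_instance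

-- ===== CLAIM (what is proved, stated in full; the proofs are below) =====
def Claim_equal_get_nearby_tiles : Prop := ∀ (curr_tile : Int × Int) (vision_radius : Int), Dom_get_nearby_tiles curr_tile vision_radius → Spec_get_nearby_tiles curr_tile vision_radius (get_nearby_tiles curr_tile vision_radius)

-- ===== LEMMAS AND PROOFS =====

-- Source B's Newton loop is Batteries'/Mathlib's `Nat.sqrt.iter` verbatim.
theorem pvIsqrtIter_eq (n g : Nat) : pvIsqrtIter n g = Nat.sqrt.iter n g := by
  induction g using Nat.strong_induction_on with
  | _ g ih =>
    unfold pvIsqrtIter Nat.sqrt.iter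
    simp only []
    by_cases h : (g + n / g) / 2 < g
    · simp only [dif_pos h]; exact ih _ h
    · simp only [dif_neg h]

theorem pvIsqrt_eq (n : Int) (hn : 0 ≤ n) : pvIsqrt n = (Nat.sqrt n.toNat : Int) := by
  unfold pvIsqrt
  by_cases h : n ≤ 1
  · simp only [if_pos h]
    interval_cases n <;> decide
  · simp only [if_neg h]
    have hm1 : ¬ (n.toNat ≤ 1) := by omega
    unfold Nat.sqrt
    rw [if_neg hm1, pvIsqrtIter_eq]
    have hlog : PySem.Int.bitLength n - 1 = n.toNat.log2 := by
      have h2 : n.natAbs < 2 ^ PySem.Int.bitLength n := PySem.Int.lt_two_pow_bitLength n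
      have h3 : 2 ^ (PySem.Int.bitLength n - 1) ≤ n.natAbs :=
        PySem.Int.two_pow_bitLength_le n (by omega)
      have hne : n.toNat ≠ 0 := by omega
      have habs : n.natAbs = n.toNat := by omega
      rw [habs] at h2 h3
      have hbl1 : 1 ≤ PySem.Int.bitLength n := by
        by_contra hc
        simp [Nat.lt_one_iff.mp (by omega : PySem.Int.bitLength n < 1)] at h2
        omega
      apply Nat.le_antisymm
      · exact (Nat.le_log2 hne).mpr h3
      · by_contra hc
        have : PySem.Int.bitLength n ≤ n.toNat.log2 := by omega
        have := (Nat.le_log2 hne).mp (le_refl _)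
        have hp : 2 ^ PySem.Int.bitLength n ≤ 2 ^ n.toNat.log2 :=
          Nat.pow_le_pow_right (by norm_num) (by omega)
        omega
    rw [hlog]

-- a filtered integer range with an interval condition is the sub-range
theorem filter_window_aux (H hi : Int) (fuel : Nat) :
    ∀ (L lo : Int), L ≤ lo → hi < H → (H - L).toNat ≤ fuel →
    (PySem.List.pyRange L H 1).filter (fun k => decide (lo ≤ k ∧ k ≤ hi))
      = PySem.List.pyRange lo (hi + 1) 1 := by
  induction fuel with
  | zero =>
    intro L lo hL hH hf
    rw [PySem.List.pyRange_one_eq_nil (by omega), PySem.List.pyRange_one_eq_nil (by omega)]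
    rfl
  | succ k ih =>
    intro L lo hL hH hf
    by_cases hLH : H ≤ L
    · rw [PySem.List.pyRange_one_eq_nil hLH, PySem.List.pyRange_one_eq_nil (by omega)]
      rfl
    · rw [PySem.List.pyRange_one_cons (by omega), List.filter_cons]
      by_cases hlo : L < lo
      · have hcond : ¬ (lo ≤ L ∧ L ≤ hi) := by omega
        simp only [hcond, decide_false, Bool.false_eq_true, if_false]
        exact ih (L + 1) lo (by omega) hH (by omega)
      · have hLeq : L = lo := by omega
        by_cases hhi : L ≤ hi
        · subst hLeq
          rw [if_pos (by rw [decide_eq_true_eq]; omega)]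
          rw [show PySem.List.pyRange L (hi + 1) 1 = L :: PySem.List.pyRange (L + 1) (hi + 1) 1
              from PySem.List.pyRange_one_cons (by omega)]
          congr 1
          have hcg : ∀ x ∈ PySem.List.pyRange (L + 1) H 1,
              (fun k => decide (L ≤ k ∧ k ≤ hi)) x = (fun k => decide (L + 1 ≤ k ∧ k ≤ hi)) x := by
            intro x hx
            have hx' := (PySem.List.mem_pyRange_one).mp hx
            simp only [decide_eq_decide]
            omega
          rw [List.filter_congr hcg]
          exact ih (L + 1) (L + 1) (by omega) hH (by omega)
        · have hcond : ¬ (lo ≤ L ∧ L ≤ hi) := by omega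
          simp only [hcond, decide_false, Bool.false_eq_true, if_false]
          rw [PySem.List.pyRange_one_eq_nil (by omega : hi + 1 ≤ lo)]
          rw [List.filter_eq_nil_iff]
          intro x hx
          have hx' := (PySem.List.mem_pyRange_one).mp hx
          simp only [decide_eq_true_eq]
          omega

theorem filter_window (L H lo hi : Int) (hL : L ≤ lo) (hH : hi < H) :
    (PySem.List.pyRange L H 1).filter (fun k => decide (lo ≤ k ∧ k ≤ hi))
      = PySem.List.pyRange lo (hi + 1) 1 :=
  filter_window_aux H hi (H - L).toNat L lo hL hH (le_refl _)

theorem row_eq (r dx : Int) (h1 : -r ≤ dx) (h2 : dx ≤ r) :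
    (PySem.List.pyRange (-r) (r + 1) 1).filter
        (fun dy => decide (dx * dx + dy * dy ≤ r * r))
      = PySem.List.pyRange (-(pvIsqrt (r * r - dx * dx))) (pvIsqrt (r * r - dx * dx) + 1) 1 := by
  have hr : 0 ≤ r := by omega
  have hn : 0 ≤ r * r - dx * dx := by nlinarith
  set b := pvIsqrt (r * r - dx * dx) with hbdef
  have hb : b = (Nat.sqrt (r * r - dx * dx).toNat : Int) := pvIsqrt_eq _ hn
  have hb0 : 0 ≤ b := by rw [hb]; positivity
  have h2 : (((r * r - dx * dx).toNat : Int)) = r * r - dx * dx := Int.toNat_of_nonneg hn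
  have hbsq : b * b ≤ r * r - dx * dx := by
    have h1 := Nat.sqrt_le' (r * r - dx * dx).toNat
    rw [hb, ← h2]
    rw [Nat.pow_two] at h1
    exact_mod_cast h1
  have hbsq2 : r * r - dx * dx < (b + 1) * (b + 1) := by
    have h1 := Nat.lt_succ_sqrt' (r * r - dx * dx).toNat
    rw [hb, ← h2]
    rw [Nat.pow_two, Nat.succ_eq_add_one] at h1
    exact_mod_cast h1
  have hbr : b ≤ r := by nlinarith
  have hcg : ∀ x ∈ PySem.List.pyRange (-r) (r + 1) 1,
      (fun dy => decide (dx * dx + dy * dy ≤ r * r)) x = (fun k => decide (-b ≤ k ∧ k ≤ b)) x := by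
    intro dy _
    simp only [decide_eq_decide]
    constructor
    · intro hle
      constructor
      · by_contra hc
        have h1 : b + 1 ≤ -dy := by omega
        nlinarith
      · by_contra hc
        have h1 : b + 1 ≤ dy := by omega
        nlinarith
    · intro ⟨h1, h2⟩
      nlinarith [mul_nonneg (by omega : (0:Int) ≤ b - dy) (by omega : (0:Int) ≤ b + dy)]
  rw [List.filter_congr hcg]
  exact filter_window (-r) (r + 1) (-b) b (by omega) (by omega)

-- A's nested loop, row by row: each row is the filtered full range, mapped
theorem a_rows (curr_tile : Int × Int) (r : Int) :
    get_nearby_tiles curr_tile r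
      = (PySem.List.pyRange (-r) (r + 1) 1).foldl
          (fun nearby dx =>
            nearby ++ ((PySem.List.pyRange (-r) (r + 1) 1).filter
                (fun dy => decide (dx * dx + dy * dy ≤ r * r))).map
              (fun dy => (curr_tile.1 + dx, curr_tile.2 + dy)))
          [] := by
  unfold get_nearby_tiles
  apply PySem.List.foldl_congr_mem
  intro acc dx _
  have h := PySem.List.foldl_append_if
    (l := PySem.List.pyRange (-r) (r + 1) 1)
    (p := fun dy => decide (dx * dx + dy * dy ≤ r * r))
    (f := fun dy => (curr_tile.1 + dx, curr_tile.2 + dy)) (acc := acc)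
  simp only [decide_eq_true_eq] at h
  exact h

-- B's nested loop, row by row: each row is the span range, mapped
theorem b_rows (curr_tile : Int × Int) (r : Int) :
    get_nearby_tiles_alt curr_tile r
      = (PySem.List.pyRange (-r) (r + 1) 1).foldl
          (fun nearby dx =>
            nearby ++ (PySem.List.pyRange (-(pvIsqrt (r * r - dx * dx)))
                (pvIsqrt (r * r - dx * dx) + 1) 1).map
              (fun dy => (curr_tile.1 + dx, curr_tile.2 + dy)))
          [] := by
  unfold get_nearby_tiles_alt
  apply PySem.List.foldl_congr_mem
  intro acc dx _
  exact PySem.List.foldl_append_singleton_eq_map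
    (l := PySem.List.pyRange (-(pvIsqrt (r * r - dx * dx))) (pvIsqrt (r * r - dx * dx) + 1) 1)
    (f := fun dy => (curr_tile.1 + dx, curr_tile.2 + dy)) (acc := acc)

-- ===== VERDICT (by name: the statement is the Claim_ definition above) =====
theorem get_nearby_tiles_spec : Claim_equal_get_nearby_tiles := by
  intro curr_tile r _
  show get_nearby_tiles curr_tile r = get_nearby_tiles_alt curr_tile r
  rw [a_rows, b_rows]
  apply PySem.List.foldl_congr_mem
  intro acc dx hdx
  have hdx' := (PySem.List.mem_pyRange_one).mp hdx
  rw [row_eq r dx (by omega) (by omega)]
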